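-- pv_equiv track=rewrite | github.com/gasperurh942/Izleti_na_slovenske_dvatisocake | zajem_podatkov.py | izlusci_cas_hoje
-- ===== SOURCE A (Python) =====
-- def izlusci_cas_hoje(niz):
--     ura = False
--     if 'h' in niz:
--         ura = True
--     ure = 0
--     minute = 0
--     for znak in niz:
--         try:
--             if ura:
--                 ure = ure * 10 + int(znak)
--             else:
--                 minute = minute * 10 + int(znak)
--         except:
--             if znak == 'h':
--                 ura = False
--     return str(ure * 60 + minute)
-- ===== SOURCE B (Python) =====
-- def izlusci_cas_hoje(niz):
--     def cifre(s):
--         v = 0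
--         for c in s:
--             try:
--                 v = v * 10 + int(c)
--             except:
--                 pass
--         return v
--     ure_s, sep, min_s = niz.partition('h')
--     if not sep:
--         ure_s, min_s = '', niz
--     return str(cifre(ure_s) * 60 + cifre(min_s))
-- ===== Notes on version B (the rewrite author's own statement) =====
-- stated objective: simpler
-- what changed: A's single pass with a mutable hours/minutes flag machine is replaced by partitioning the string at the first hour-separator character and folding each part's digits with one small helper.
import Mathlib
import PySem

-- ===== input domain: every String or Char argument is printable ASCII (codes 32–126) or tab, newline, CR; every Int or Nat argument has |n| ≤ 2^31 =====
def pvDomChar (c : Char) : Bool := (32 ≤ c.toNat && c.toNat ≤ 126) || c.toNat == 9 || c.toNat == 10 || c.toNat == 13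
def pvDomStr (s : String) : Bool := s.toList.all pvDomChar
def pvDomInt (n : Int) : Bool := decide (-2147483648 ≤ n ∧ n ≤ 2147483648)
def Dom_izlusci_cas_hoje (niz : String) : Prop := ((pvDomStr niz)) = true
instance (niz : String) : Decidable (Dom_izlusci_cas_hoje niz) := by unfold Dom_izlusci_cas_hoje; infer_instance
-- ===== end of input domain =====

-- B replaces A's one-pass flag-state machine by partitioning at the first hour separator
-- and folding each part's digits with one helper (objective: simpler decomposition).

-- ===== PORT A =====
-- one step of A's loop over the state (ura, ure, minute);
-- try: int(znak) … except: = match on PySem.Int.ofChars? [znak] (none = ValueError)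
def izlusciStepA (st : Bool × Int × Int) (znak : Char) : Bool × Int × Int :=
  match PySem.Int.ofChars? [znak] with
  | some d =>
    if st.1 then (st.1, st.2.1 * 10 + d, st.2.2)
    else (st.1, st.2.1, st.2.2 * 10 + d)
  | none => if znak == 'h' then (false, st.2.1, st.2.2) else st

def izlusci_cas_hoje (niz : String) : String :=
  let ura : Bool := PySem.Str.isIn "h" niz    -- 'h' in niz
  let st := niz.toList.foldl izlusciStepA (ura, 0, 0)
  PySem.Int.toStr (st.2.1 * 60 + st.2.2)

-- ===== PORT B =====
-- helper cifre: fold the digits of a substring into an Int (try: int(c) per char, ignore failures)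
def cifre (s : List Char) : Int :=
  s.foldl (fun v c => match PySem.Int.ofChars? [c] with
                      | some d => v * 10 + d
                      | none => v) 0

def izlusci_cas_hoje_alt (niz : String) : String :=
  -- niz.partition('h'), exact for the single-char separator:
  -- part before the first 'h' = takeWhile, part after it = tail of dropWhile
  let l := niz.toList
  let ureMin : List Char × List Char :=
    match l.dropWhile (fun c => c ≠ 'h') with
    | [] => ([], l)                                     -- no 'h': everything is minutes
    | _ :: t => (l.takeWhile (fun c => c ≠ 'h'), t)
  PySem.Int.toStr (cifre ureMin.1 * 60 + cifre ureMin.2)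

-- ===== PRECONDITION & SPEC =====
def Spec_izlusci_cas_hoje (niz : String) (out : String) : Prop := out = izlusci_cas_hoje_alt niz
instance (niz : String) (out : String) : Decidable (Spec_izlusci_cas_hoje niz out) := by unfold Spec_izlusci_cas_hoje; infer_instance

-- ===== CLAIM (what is proved, stated in full; the proofs are below) =====
def Claim_equal_izlusci_cas_hoje : Prop := ∀ (niz : String), Dom_izlusci_cas_hoje niz → Spec_izlusci_cas_hoje niz (izlusci_cas_hoje niz)

-- ===== LEMMAS AND PROOFS =====

-- with the flag down, A's loop only accumulates into minute, exactly as cifre does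
theorem foldA_false (l : List Char) (u m : Int) :
    l.foldl izlusciStepA (false, u, m)
      = (false, u, l.foldl (fun v c => match PySem.Int.ofChars? [c] with
                                       | some d => v * 10 + d
                                       | none => v) m) := by
  induction l generalizing m with
  | nil => rfl
  | cons c t ih =>
    simp only [List.foldl_cons]
    have hstep : izlusciStepA (false, u, m) c
        = (false, u, match PySem.Int.ofChars? [c] with
                     | some d => m * 10 + d
                     | none => m) := by
      unfold izlusciStepA
      rcases h : PySem.Int.ofChars? [c] with _ | d <;> simp
    rw [hstep, ih]

-- with the flag up and no 'h' ahead, A's loop only accumulates into ure, exactly as cifre does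
theorem foldA_true_noh (l : List Char) (u m : Int) (hh : 'h' ∉ l) :
    l.foldl izlusciStepA (true, u, m)
      = (true, l.foldl (fun v c => match PySem.Int.ofChars? [c] with
                                   | some d => v * 10 + d
                                   | none => v) u, m) := by
  induction l generalizing u with
  | nil => rfl
  | cons c t ih =>
    have hc : c ≠ 'h' := fun h => hh (h ▸ List.mem_cons_self)
    have ht : 'h' ∉ t := fun h => hh (List.mem_cons_of_mem _ h)
    simp only [List.foldl_cons]
    have hstep : izlusciStepA (true, u, m) c
        = (true, (match PySem.Int.ofChars? [c] with
                  | some d => u * 10 + d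
                  | none => u), m) := by
      unfold izlusciStepA
      rcases h : PySem.Int.ofChars? [c] with _ | d <;> simp [hc]
    rw [hstep]
    exact ih _ ht

-- cifre with a starting accumulator (used to restate the two lemmas above through cifre)
theorem cifre_eq_foldl (l : List Char) :
    cifre l = l.foldl (fun v c => match PySem.Int.ofChars? [c] with
                                  | some d => v * 10 + d
                                  | none => v) 0 := rfl

-- dropping up to the first 'h' yields a list starting with 'h'
theorem dropWhile_h (l : List Char) (hh : 'h' ∈ l) :
    l.dropWhile (fun c => c ≠ 'h') = 'h' :: (l.dropWhile (fun c => c ≠ 'h')).tail := by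
  induction l with
  | nil => cases hh
  | cons c t ih =>
    rw [List.dropWhile_cons]
    by_cases hc : c = 'h'
    · subst hc; simp
    · have hd : (decide (c ≠ 'h')) = true := by simp [hc]
      simp only [hd, if_true]
      exact ih (by
        rcases List.mem_cons.mp hh with h | h
        · exact absurd h.symm hc
        · exact h)

theorem takeWhile_not_h (l : List Char) : 'h' ∉ l.takeWhile (fun c => c ≠ 'h') := by
  intro h
  have := List.mem_takeWhile_imp h
  simp at this

theorem isIn_h_iff (s : String) : PySem.Str.isIn "h" s = true ↔ 'h' ∈ s.toList := by
  rw [PySem.Str.isIn_iff_infix]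
  constructor
  · intro h
    exact h.mem (by simp)
  · intro h
    obtain ⟨pre, suf, hps⟩ := List.append_of_mem h
    exact ⟨pre, suf, by simp [hps]⟩

theorem stepA_h (x : Int) : izlusciStepA (true, x, 0) 'h' = (false, x, 0) := by
  unfold izlusciStepA
  have h : PySem.Int.ofChars? ['h'] = none := by decide
  rw [h]
  rfl

-- ===== VERDICT (by name: the statement is the Claim_ definition above) =====
theorem izlusci_cas_hoje_spec : Claim_equal_izlusci_cas_hoje := by
  intro niz _
  unfold Spec_izlusci_cas_hoje izlusci_cas_hoje izlusci_cas_hoje_alt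
  by_cases hh : 'h' ∈ niz.toList
  · have hin : PySem.Str.isIn "h" niz = true := (isIn_h_iff niz).mpr hh
    set pre := niz.toList.takeWhile (fun c => c ≠ 'h') with hpredef
    set t := (niz.toList.dropWhile (fun c => c ≠ 'h')).tail with htdef
    have hdw : niz.toList.dropWhile (fun c => c ≠ 'h') = 'h' :: t := dropWhile_h _ hh
    have hsplit : pre ++ 'h' :: t = niz.toList := by
      rw [← hdw, hpredef]
      exact List.takeWhile_append_dropWhile
    simp only [hin, hdw]
    conv_lhs => rw [← hsplit, List.foldl_append,
        foldA_true_noh _ _ _ (hpredef ▸ takeWhile_not_h niz.toList),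
        List.foldl_cons, stepA_h, foldA_false]
    dsimp only
    rw [cifre_eq_foldl, cifre_eq_foldl]
  · have hin : PySem.Str.isIn "h" niz = false := by
      rw [Bool.eq_false_iff]
      intro h
      exact hh ((isIn_h_iff niz).mp h)
    have hdw : niz.toList.dropWhile (fun c => c ≠ 'h') = [] := by
      rw [List.dropWhile_eq_nil_iff]
      intro x hx
      simp only [decide_eq_true_eq]
      exact fun he => hh (he ▸ hx)
    simp only [hin, hdw]
    rw [foldA_false, cifre_eq_foldl]
    simp [cifre]
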